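-- pv_equiv track=rewrite | github.com/chrislyons/carbon-acx | calc/refs_util.py | merge_manifest
-- ===== SOURCE A (Python) =====
-- from typing import Iterator, Mapping, MutableMapping, Sequence
--
-- ManifestRow = MutableMapping[str, str]
--
-- def merge_manifest(
--     existing: Sequence[ManifestRow], updates: Mapping[str, ManifestRow]
-- ) -> list[ManifestRow]:
--     lookup = {row.get("source_id", ""): dict(row) for row in existing if row.get("source_id")}
--     for key, row in updates.items():
--         lookup[key] = {**lookup.get(key, {}), **row, "source_id": key}
--     ordered_keys = sorted(lookup)
--     return [lookup[key] for key in ordered_keys]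
-- ===== SOURCE B (Python) =====
-- def merge_manifest(existing, updates):
--     keys = []
--     for row in existing:
--         sid = row.get("source_id", "")
--         if sid and sid not in keys:
--             keys.append(sid)
--     for key in updates:
--         if key not in keys:
--             keys.append(key)
--     keys.sort()
--     out = []
--     for key in keys:
--         base = {}
--         for row in existing:
--             sid = row.get("source_id", "")
--             if sid and sid == key:
--                 base = dict(row)
--         if key in updates:
--             out.append({**base, **updates[key], "source_id": key})
--         else:
--             out.append(base)
--     return out
-- ===== Notes on version B (the rewrite author's own statement) =====
-- stated objective: alternative
-- what changed: B builds no merged lookup dict at all: it collects the sorted deduplicated key list first and then, for each key, rescans existing linearly for the last row with that source_id and merges with the update entry at emit time; Pre_ excludes updates association lists with duplicate keys, which do not encode any Python Mapping input.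
import Mathlib
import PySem

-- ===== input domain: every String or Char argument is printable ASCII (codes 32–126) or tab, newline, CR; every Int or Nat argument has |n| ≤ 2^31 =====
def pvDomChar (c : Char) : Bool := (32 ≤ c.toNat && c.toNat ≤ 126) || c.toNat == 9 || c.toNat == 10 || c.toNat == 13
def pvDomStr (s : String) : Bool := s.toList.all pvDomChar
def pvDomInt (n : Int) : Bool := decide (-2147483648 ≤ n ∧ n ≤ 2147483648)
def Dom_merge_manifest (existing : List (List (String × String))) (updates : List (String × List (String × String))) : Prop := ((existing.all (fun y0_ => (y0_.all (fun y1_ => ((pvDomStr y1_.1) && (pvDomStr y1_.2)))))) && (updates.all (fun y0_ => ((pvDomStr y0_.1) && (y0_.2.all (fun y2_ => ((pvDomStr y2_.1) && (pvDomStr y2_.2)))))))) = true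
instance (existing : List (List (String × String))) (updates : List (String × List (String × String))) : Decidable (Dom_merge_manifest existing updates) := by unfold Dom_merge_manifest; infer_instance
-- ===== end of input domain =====

-- B builds no merged lookup dict at all: it collects the sorted deduplicated key list first and then,
-- for each key, rescans existing linearly for the last row with that source_id and merges with the
-- update entry at emit time (alternative decomposition: nested linear scans instead of a dict index).

-- ===== PORT A =====
def merge_manifest (existing : List (List (String × String))) (updates : List (String × List (String × String))) : List (List (String × String)) :=
  -- lookup = {row.get("source_id",""): dict(row) for row in existing if row.get("source_id")}
  let lookup : PySem.Dict String (PySem.Dict String String) :=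
    existing.foldl (fun d row =>
      if (PySem.Dict.mk row).getD "source_id" "" ≠ "" then
        d.insert ((PySem.Dict.mk row).getD "source_id" "") (PySem.Dict.ofList row)
      else d) PySem.Dict.empty
  -- for key, row in updates.items(): lookup[key] = {**lookup.get(key, {}), **row, "source_id": key}
  let lookup :=
    updates.foldl (fun d kr =>
      d.insert kr.1 (((d.getD kr.1 PySem.Dict.empty).update kr.2).insert "source_id" kr.1)) lookup
  -- ordered_keys = sorted(lookup); return [lookup[key] for key in ordered_keys]
  (PySem.List.sorted lookup.keys (fun k => k) false).map
    (fun k => (lookup.getD k PySem.Dict.empty).items)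

-- ===== PORT B =====
def merge_manifest_alt (existing : List (List (String × String))) (updates : List (String × List (String × String))) : List (List (String × String)) :=
  -- keys = []; for row in existing: sid = row.get("source_id",""); if sid and sid not in keys: keys.append(sid)
  let keys : List String :=
    existing.foldl (fun ks row =>
      let sid := (PySem.Dict.mk row).getD "source_id" ""
      if sid ≠ "" ∧ sid ∉ ks then ks ++ [sid] else ks) []
  -- for key in updates: if key not in keys: keys.append(key)
  let keys := updates.foldl (fun ks kr => if kr.1 ∉ ks then ks ++ [kr.1] else ks) keys
  -- keys.sort()
  let keys := PySem.List.sorted keys (fun k => k) false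
  -- for key in keys: base = last existing row (dict) with that source_id, else {};
  --                  emit {**base, **updates[key], "source_id": key} if key in updates else base
  keys.map (fun key =>
    let base : PySem.Dict String String :=
      existing.foldl (fun b row =>
        let sid := (PySem.Dict.mk row).getD "source_id" ""
        if sid ≠ "" ∧ sid = key then PySem.Dict.ofList row else b) PySem.Dict.empty
    match (PySem.Dict.mk updates).get? key with
    | some row => ((base.update row).insert "source_id" key).items
    | none => base.items)

-- ===== PRECONDITION & SPEC =====
-- Pre_ excludes updates association lists with duplicate keys: they do not encode any Python
-- Mapping input (a dict's keys are unique), so neither behaviour on them is Python's.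
def Pre_merge_manifest (existing : List (List (String × String))) (updates : List (String × List (String × String))) : Prop :=
  (updates.map Prod.fst).Nodup
instance (existing : List (List (String × String))) (updates : List (String × List (String × String))) : Decidable (Pre_merge_manifest existing updates) := by unfold Pre_merge_manifest; infer_instance

def pvWitness_merge_manifest : (List (List (String × String))) × (List (String × List (String × String))) :=
  ([[("source_id", "a"), ("x", "1")], [("y", "2")]], [("b", [("z", "3")]), ("a", [("x", "9")])])

def Spec_merge_manifest (existing : List (List (String × String))) (updates : List (String × List (String × String))) (out : List (List (String × String))) : Prop := out = merge_manifest_alt existing updates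
instance (existing : List (List (String × String))) (updates : List (String × List (String × String))) (out : List (List (String × String))) : Decidable (Spec_merge_manifest existing updates out) := by unfold Spec_merge_manifest; infer_instance

-- ===== CLAIM (what is proved, stated in full; the proofs are below) =====
def Claim_equal_merge_manifest : Prop := ∀ (existing : List (List (String × String))) (updates : List (String × List (String × String))), Dom_merge_manifest existing updates → Pre_merge_manifest existing updates → Spec_merge_manifest existing updates (merge_manifest existing updates)

-- ===== LEMMAS AND PROOFS =====

-- B's first key loop builds exactly the key list of A's existing-rows dict
theorem mm_keys_existing (existing : List (List (String × String)))
    (d : PySem.Dict String (PySem.Dict String String)) (ks : List String)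
    (h : ks = d.keys) :
    existing.foldl (fun ks row =>
      let sid := (PySem.Dict.mk row).getD "source_id" ""
      if sid ≠ "" ∧ sid ∉ ks then ks ++ [sid] else ks) ks =
    (existing.foldl (fun d row =>
      if (PySem.Dict.mk row).getD "source_id" "" ≠ "" then
        d.insert ((PySem.Dict.mk row).getD "source_id" "") (PySem.Dict.ofList row)
      else d) d).keys := by
  induction existing generalizing d ks with
  | nil => simpa using h
  | cons row rest ih =>
    simp only [List.foldl_cons]
    apply ih
    set sid := (PySem.Dict.mk row).getD "source_id" "" with hsid
    by_cases h1 : sid ≠ ""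
    · have hkeys : (d.insert sid (PySem.Dict.ofList row)).keys = PySem.Set.add d.keys sid := by
        have := PySem.Dict.keys_foldl_insert [sid] (fun _ _ => PySem.Dict.ofList row) d
        simpa [PySem.Set.update_cons, PySem.Set.update_nil] using this
      rw [if_pos h1, hkeys, PySem.Set.add_eq_ite]
      by_cases h2 : sid ∈ d.keys
      · simp [h1, h2, h]
      · simp [h1, h2, h]
    · simp [h1, h]

-- B's second key loop is A's update loop on the key lists
theorem mm_keys_updates (updates : List (String × List (String × String)))
    (d : PySem.Dict String (PySem.Dict String String)) (ks : List String)
    (h : ks = d.keys) :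
    updates.foldl (fun ks kr => if kr.1 ∉ ks then ks ++ [kr.1] else ks) ks =
    (updates.foldl (fun d kr =>
      d.insert kr.1 (((d.getD kr.1 PySem.Dict.empty).update kr.2).insert "source_id" kr.1)) d).keys := by
  induction updates generalizing d ks with
  | nil => simpa using h
  | cons kr rest ih =>
    simp only [List.foldl_cons]
    apply ih
    have hkeys : ∀ v, (d.insert kr.1 v).keys = PySem.Set.add d.keys kr.1 := by
      intro v
      have := PySem.Dict.keys_foldl_insert [kr.1] (fun _ _ => v) d
      simpa [PySem.Set.update_cons, PySem.Set.update_nil] using this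
    rw [hkeys, PySem.Set.add_eq_ite]
    by_cases h2 : kr.1 ∈ d.keys
    · simp [h2, h]
    · simp [h2, h]

-- the per-key value of A's existing-rows dict is B's last-matching-row rescan
theorem mm_base_getD (existing : List (List (String × String)))
    (d : PySem.Dict String (PySem.Dict String String)) (k : String) :
    (existing.foldl (fun d row =>
      if (PySem.Dict.mk row).getD "source_id" "" ≠ "" then
        d.insert ((PySem.Dict.mk row).getD "source_id" "") (PySem.Dict.ofList row)
      else d) d).getD k PySem.Dict.empty =
    existing.foldl (fun b row =>
      let sid := (PySem.Dict.mk row).getD "source_id" ""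
      if sid ≠ "" ∧ sid = k then PySem.Dict.ofList row else b) (d.getD k PySem.Dict.empty) := by
  induction existing generalizing d with
  | nil => simp
  | cons row rest ih =>
    simp only [List.foldl_cons]
    rw [ih]
    congr 1
    set sid := (PySem.Dict.mk row).getD "source_id" "" with hsid
    by_cases h1 : sid ≠ ""
    · by_cases h2 : sid = k
      · subst h2; simp [h1, PySem.Dict.getD_insert_self]
      · have hne : k ≠ sid := fun hc => h2 hc.symm
        simp [h1, h2, PySem.Dict.getD_insert, hne]
    · simp [h1]

-- the per-key value of A's update loop, given unique update keys
theorem mm_fold_getD (ups : List (String × List (String × String)))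
    (h : (ups.map Prod.fst).Nodup) (d : PySem.Dict String (PySem.Dict String String))
    (k : String) :
    (ups.foldl (fun d kr =>
        d.insert kr.1 (((d.getD kr.1 PySem.Dict.empty).update kr.2).insert "source_id" kr.1)) d).getD k PySem.Dict.empty =
      (match (PySem.Dict.mk ups).get? k with
       | some row => ((d.getD k PySem.Dict.empty).update row).insert "source_id" k
       | none => d.getD k PySem.Dict.empty) := by
  induction ups generalizing d with
  | nil => simp [PySem.Dict.get?]
  | cons p rest ih =>
    obtain ⟨k0, r0⟩ := p
    simp only [List.map_cons, List.nodup_cons] at h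
    obtain ⟨hk0, hrest⟩ := h
    simp only [List.foldl_cons]
    rw [ih hrest]
    rw [PySem.Dict.get?_mk_cons]
    by_cases he : k0 = k
    · subst he
      have hnone : (PySem.Dict.mk rest).get? k0 = none := by
        rw [PySem.Dict.get?_eq_none_iff_not_mem_keys]
        simpa [PySem.Dict.keys_mk] using hk0
      simp [hnone, PySem.Dict.getD_insert_self]
    · have hne : k ≠ k0 := fun hc => he hc.symm
      simp [beq_iff_eq, he, PySem.Dict.getD_insert, hne]

theorem merge_manifest_eq (existing : List (List (String × String)))
    (updates : List (String × List (String × String)))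
    (hpre : (updates.map Prod.fst).Nodup) :
    merge_manifest existing updates = merge_manifest_alt existing updates := by
  unfold merge_manifest merge_manifest_alt
  dsimp only
  set base : PySem.Dict String (PySem.Dict String String) :=
    existing.foldl (fun d row =>
      if (PySem.Dict.mk row).getD "source_id" "" ≠ "" then
        d.insert ((PySem.Dict.mk row).getD "source_id" "") (PySem.Dict.ofList row)
      else d) PySem.Dict.empty with hbase
  -- the (unsorted) key lists coincide outright
  have hkeys :
      updates.foldl (fun ks kr => if kr.1 ∉ ks then ks ++ [kr.1] else ks)
        (existing.foldl (fun ks row =>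
          let sid := (PySem.Dict.mk row).getD "source_id" ""
          if sid ≠ "" ∧ sid ∉ ks then ks ++ [sid] else ks) []) =
      (updates.foldl (fun d kr =>
        d.insert kr.1 (((d.getD kr.1 PySem.Dict.empty).update kr.2).insert "source_id" kr.1)) base).keys := by
    apply mm_keys_updates
    rw [hbase]
    exact mm_keys_existing existing PySem.Dict.empty [] (by simp)
  rw [← hkeys]
  apply List.map_congr_left
  intro k _
  rw [mm_fold_getD updates hpre base k, hbase, mm_base_getD]
  have hinit : (PySem.Dict.empty : PySem.Dict String (PySem.Dict String String)).getD k PySem.Dict.empty = PySem.Dict.empty := by simp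
  rw [hinit]
  cases (PySem.Dict.mk updates).get? k <;> rfl

-- ===== VERDICT (by name: the statement is the Claim_ definition above) =====
theorem merge_manifest_spec : Claim_equal_merge_manifest := by
  intro existing updates _ hpre
  unfold Spec_merge_manifest
  exact merge_manifest_eq existing updates hpre
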